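-- pv_equiv track=rewrite | github.com/kszhao552/CS111 | labs/lab4/lab4.py | myslice
-- ===== SOURCE A (Python) =====
-- def myslice(values, start, stop):
--     if values == []:
--         return []
--     else:
--         slice_rest = myslice(values[1:], (start-1), (stop-1))
--         if start <= 0 < stop:
--             return [values[0]]+slice_rest
--         else:
--             return slice_rest
-- ===== SOURCE B (Python) =====
-- def myslice(values, start, stop):
--     result = []
--     for i, v in enumerate(values):
--         if start <= i < stop:
--             result.append(v)
--     return result
-- ===== Notes on version B (the rewrite author's own statement) =====
-- stated objective: simpler
-- what changed: Replaces the tail recursion over values[1:] with decremented bounds by a single iterative enumerate loop appending each value whose index satisfies start <= i < stop.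
import Mathlib
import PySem

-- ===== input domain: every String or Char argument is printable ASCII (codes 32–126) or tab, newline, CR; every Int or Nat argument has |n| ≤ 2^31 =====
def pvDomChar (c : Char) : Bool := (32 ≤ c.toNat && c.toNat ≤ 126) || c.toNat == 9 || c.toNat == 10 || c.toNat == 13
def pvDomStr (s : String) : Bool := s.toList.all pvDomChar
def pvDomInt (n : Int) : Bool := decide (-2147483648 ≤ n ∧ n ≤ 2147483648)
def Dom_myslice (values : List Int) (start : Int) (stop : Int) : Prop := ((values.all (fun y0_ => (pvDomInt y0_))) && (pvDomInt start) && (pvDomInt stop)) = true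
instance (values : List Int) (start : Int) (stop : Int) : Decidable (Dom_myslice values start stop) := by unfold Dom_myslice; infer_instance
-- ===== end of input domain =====

-- ===== PORT A =====
-- Port of A: structural recursion on values, decrementing both bounds.
def myslice (values : List Int) (start : Int) (stop : Int) : List Int :=
  match values with
  | [] => []
  | v :: rest =>
    let slice_rest := myslice rest (start - 1) (stop - 1)
    if start ≤ 0 ∧ 0 < stop then v :: slice_rest else slice_rest

-- ===== PORT B =====
-- Port of B: one loop over enumerate(values), appending values whose index is in [start, stop).
def mysliceLoop (start stop : Int) : List (Int × Int) → List Int → List Int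
  | [], acc => acc
  | (i, v) :: rest, acc =>
    mysliceLoop start stop rest (if start ≤ i ∧ i < stop then acc ++ [v] else acc)

def myslice_alt (values : List Int) (start : Int) (stop : Int) : List Int :=
  mysliceLoop start stop (PySem.List.enumerate values 0) []

-- ===== PRECONDITION & SPEC =====
def Spec_myslice (values : List Int) (start : Int) (stop : Int) (out : List Int) : Prop := out = myslice_alt values start stop
instance (values : List Int) (start : Int) (stop : Int) (out : List Int) : Decidable (Spec_myslice values start stop out) := by unfold Spec_myslice; infer_instance

-- ===== CLAIM (what is proved, stated in full; the proofs are below) =====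
def Claim_equal_myslice : Prop := ∀ (values : List Int) (start : Int) (stop : Int), Dom_myslice values start stop → Spec_myslice values start stop (myslice values start stop)

-- ===== LEMMAS AND PROOFS =====

-- ===== VERDICT (by name: the statement is the Claim_ definition above) =====
theorem mysliceLoop_acc (start stop : Int) (ps : List (Int × Int)) (acc : List Int) :
    mysliceLoop start stop ps acc = acc ++ mysliceLoop start stop ps [] := by
  induction ps generalizing acc with
  | nil => simp [mysliceLoop]
  | cons p rest ih =>
    obtain ⟨i, v⟩ := p
    simp only [mysliceLoop]
    rw [ih, ih (if start ≤ i ∧ i < stop then [] ++ [v] else [])]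
    split <;> simp

theorem mysliceLoop_shift (start stop : Int) (vs : List Int) (s : Int) (acc : List Int) :
    mysliceLoop start stop (PySem.List.enumerate vs (s + 1)) acc =
    mysliceLoop (start - 1) (stop - 1) (PySem.List.enumerate vs s) acc := by
  induction vs generalizing s acc with
  | nil => simp [PySem.List.enumerate_nil, mysliceLoop]
  | cons v rest ih =>
    rw [PySem.List.enumerate_cons, PySem.List.enumerate_cons]
    simp only [mysliceLoop]
    rw [ih]
    have h : (start ≤ s + 1 ∧ s + 1 < stop) ↔ (start - 1 ≤ s ∧ s < stop - 1) := by omega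
    by_cases hc : start - 1 ≤ s ∧ s < stop - 1
    · rw [if_pos hc, if_pos (h.mpr hc)]
    · rw [if_neg hc, if_neg (fun hx => hc (h.mp hx))]

theorem myslice_eq_alt (values : List Int) (start stop : Int) :
    myslice values start stop = myslice_alt values start stop := by
  induction values generalizing start stop with
  | nil => simp [myslice, myslice_alt, PySem.List.enumerate_nil, mysliceLoop]
  | cons v rest ih =>
    simp only [myslice, myslice_alt, PySem.List.enumerate_cons, mysliceLoop]
    rw [show (0 : Int) + 1 = 0 + 1 from rfl, mysliceLoop_shift,
        mysliceLoop_acc, ih, myslice_alt]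
    split <;> simp

theorem myslice_spec : Claim_equal_myslice := by
  intro values start stop _
  unfold Spec_myslice
  exact myslice_eq_alt values start stop
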